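-- pv_equiv track=rewrite | github.com/Vergil0327/leetcode-history | Stack/3816. Lexicographically Smallest String After Deleting Duplicate Characters/solution.py | lexSmallestAfterDeletion
-- ===== SOURCE A (Python) =====
-- from collections import Counter
--
-- def lexSmallestAfterDeletion(s: str) -> str:
--     # 1. Count frequencies
--     counts = Counter(s)
--     stack = []
--
--     # 2. Monotonic Step: Remove 'heavy' characters followed by 'lighter' ones
--     for char in s:
--         while stack and stack[-1] > char and counts[stack[-1]] > 1:
--             counts[stack.pop()] -= 1
--         stack.append(char)
--
--     # 3. Shortening Step: If we have duplicates left,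
--     # only remove from the very end to satisfy "aa" -> "a"
--     # and "aba" -> "ab" without breaking "aacb".
--     while len(stack) > 1:
--         last_char = stack[-1]
--         # If the last character appears earlier in the stack,
--         # deleting it always makes the string lexicographically smaller.
--
--         # Check if last_char exists in stack[0...-2]
--         exists_earlier = False
--         for i in range(len(stack) - 1):
--             if stack[i] == last_char:
--                 exists_earlier = True
--                 break
--
--         if exists_earlier:
--             stack.pop()
--         else:
--             break
--
--     return "".join(stack)
-- ===== SOURCE B (Python) =====
-- def lexSmallestAfterDeletion(s: str) -> str:
--     # Different bookkeeping: precompute each character's last occurrence index;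
--     # pop the stack top when it reappears later in s or is already duplicated on
--     # the stack; then cut the stack at the last first-occurrence in one forward
--     # pass instead of popping from the end with rescans.
--     last = {c: i for i, c in enumerate(s)}
--     dup = {}
--     stack = []
--     for i, char in enumerate(s):
--         while stack and stack[-1] > char and (dup[stack[-1]] > 1 or last[stack[-1]] >= i):
--             dup[stack[-1]] -= 1
--             stack.pop()
--         stack.append(char)
--         dup[char] = dup.get(char, 0) + 1
--     seen = set()
--     cut = 0
--     for i, c in enumerate(stack):
--         if c not in seen:
--             seen.add(c)
--             cut = i + 1
--     return "".join(stack[:cut])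
-- ===== Notes on version B (the rewrite author's own statement) =====
-- stated objective: faster
-- what changed: B precomputes each character's last-occurrence index (pop when the top reappears later or is duplicated on the stack) instead of A's decremented global counter, and replaces A's backward pop-with-rescan shortening loop by a single forward pass that cuts the stack after its last first-occurrence.
import Mathlib
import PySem

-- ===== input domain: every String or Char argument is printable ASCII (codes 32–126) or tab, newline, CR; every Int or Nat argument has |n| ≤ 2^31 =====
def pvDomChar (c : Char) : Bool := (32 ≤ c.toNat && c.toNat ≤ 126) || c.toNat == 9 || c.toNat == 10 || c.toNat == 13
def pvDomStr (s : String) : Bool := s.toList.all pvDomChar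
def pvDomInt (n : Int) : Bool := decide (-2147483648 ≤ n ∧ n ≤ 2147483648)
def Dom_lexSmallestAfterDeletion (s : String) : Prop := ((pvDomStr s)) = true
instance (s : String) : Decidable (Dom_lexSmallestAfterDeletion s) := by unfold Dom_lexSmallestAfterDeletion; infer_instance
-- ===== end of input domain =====

-- B replaces A's decremented global counter by a precomputed last-occurrence index
-- plus a counter of the stack, and A's backward pop-with-rescan shortening loop by
-- a single forward pass cutting at the last first-occurrence; same return values.

-- ===== PORT A =====
-- stacks are held with the TOP at the HEAD (Python's stack reversed); join reverses back

-- the inner while of step 2: pop while top > char and counts[top] > 1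
def lexA_pop (counts : PySem.Dict Char Int) (stack : List Char) (c : Char) :
    PySem.Dict Char Int × List Char :=
  match stack with
  | [] => (counts, [])
  | top :: rest =>
    if c < top ∧ counts.getD top 0 > 1 then
      lexA_pop (counts.modify top 0 (· - 1)) rest c
    else (counts, top :: rest)

-- one iteration of the for loop of step 2
def lexA_push (st : PySem.Dict Char Int × List Char) (c : Char) :
    PySem.Dict Char Int × List Char :=
  match lexA_pop st.1 st.2 c with
  | (counts, stack) => (counts, c :: stack)

-- A's linear scan 'for i in range(len(stack)-1): if stack[i] == last_char: …'
-- (scans bottom-to-top, hence over rest.reverse)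
def lexA_scan (l : List Char) (last : Char) : Bool :=
  match l with
  | [] => false
  | x :: xs => if x == last then true else lexA_scan xs last

-- step 3: while len(stack) > 1, pop the top if it occurs earlier in the stack
def lexA_short (stack : List Char) : List Char :=
  match stack with
  | top :: h :: t =>
    if lexA_scan (h :: t).reverse top then lexA_short (h :: t) else top :: h :: t
  | l => l

def lexSmallestAfterDeletion (s : String) : String :=
  match s.toList.foldl lexA_push (PySem.Dict.counter s.toList, []) with
  | (_, stack) => String.ofList (lexA_short stack).reverse

-- ===== PORT B =====

-- last = {c: i for i, c in enumerate(s)}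
def lexB_last (l : List Char) : PySem.Dict Char Int :=
  (PySem.List.enumerate l 0).foldl (fun d p => d.insert p.2 p.1) PySem.Dict.empty

-- the inner while: pop while top > char and (dup[top] > 1 or last[top] >= i)
-- (last[top] always exists in the Python since top came from s; getD is exact)
def lexB_pop (last dup : PySem.Dict Char Int) (stack : List Char) (i : Int) (c : Char) :
    PySem.Dict Char Int × List Char :=
  match stack with
  | [] => (dup, [])
  | top :: rest =>
    if c < top ∧ (dup.getD top 0 > 1 ∨ last.getD top (-1) ≥ i) then
      lexB_pop last (dup.modify top 0 (· - 1)) rest i c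
    else (dup, top :: rest)

-- one iteration of 'for i, char in enumerate(s)': pop, push, dup[char] += 1
def lexB_push (last : PySem.Dict Char Int) (st : PySem.Dict Char Int × List Char)
    (p : Int × Char) : PySem.Dict Char Int × List Char :=
  match lexB_pop last st.1 st.2 p.1 p.2 with
  | (dup, stack) => (dup.insert p.2 (dup.getD p.2 0 + 1), p.2 :: stack)

-- 'for i, c in enumerate(stack): if c not in seen: seen.add(c); cut = i + 1'
def lexB_cut (l : List (Int × Char)) (seen : PySem.Set Char) (cut : Int) : Int :=
  match l with
  | [] => cut
  | (i, c) :: t =>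
    if PySem.Set.contains seen c then lexB_cut t seen cut
    else lexB_cut t (PySem.Set.add seen c) (i + 1)

def lexSmallestAfterDeletion_alt (s : String) : String :=
  -- last = {c: i for i, c in enumerate(s)} is lexB_last s.toList, used in the fold
  match (PySem.List.enumerate s.toList 0).foldl (lexB_push (lexB_last s.toList))
      (PySem.Dict.empty, []) with
  | (_, stack) =>
    -- stack is top-at-head; Source B's forward iteration and stack[:cut] act on stack.reverse
    String.ofList (stack.reverse.take
      (lexB_cut (PySem.List.enumerate stack.reverse 0) PySem.Set.empty 0).toNat)

-- ===== PRECONDITION & SPEC =====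
def Spec_lexSmallestAfterDeletion (s : String) (out : String) : Prop := out = lexSmallestAfterDeletion_alt s
instance (s : String) (out : String) : Decidable (Spec_lexSmallestAfterDeletion s out) := by unfold Spec_lexSmallestAfterDeletion; infer_instance

-- ===== CLAIM (what is proved, stated in full; the proofs are below) =====
def Claim_equal_lexSmallestAfterDeletion : Prop := ∀ (s : String), Dom_lexSmallestAfterDeletion s → Spec_lexSmallestAfterDeletion s (lexSmallestAfterDeletion s)

-- ===== LEMMAS AND PROOFS =====

-- membership in a dropped suffix of an appended list
theorem mem_drop_append (L : List Char) (a x : Char) (j : Nat) :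
    x ∈ (L ++ [a]).drop j ↔ x ∈ L.drop j ∨ (x = a ∧ j ≤ L.length) := by
  by_cases h : j ≤ L.length
  · rw [List.drop_append_of_le_length h]
    simp [h]
  · have h1 : (L ++ [a]).drop j = [] := by
      apply List.drop_eq_nil_of_le; simp; omega
    have h2 : L.drop j = [] := List.drop_eq_nil_of_le (by omega)
    simp [h1, h2]; omega

theorem lexB_last_spec (L : List Char) (x : Char) (j : Nat) :
    (lexB_last L).getD x (-1) ≥ (j : Int) ↔ x ∈ L.drop j := by
  induction L using List.reverseRecOn with
  | nil => simp [lexB_last, PySem.List.enumerate, PySem.Dict.getD_empty]; omega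
  | append_singleton L a ih =>
    have he : lexB_last (L ++ [a]) = (lexB_last L).insert a (L.length : Int) := by
      unfold lexB_last
      rw [PySem.List.enumerate_append, List.foldl_append]
      simp [PySem.List.enumerate]
    rw [he, PySem.Dict.getD_insert, mem_drop_append]
    by_cases hx : x = a
    · subst hx
      rw [if_pos rfl]
      constructor
      · intro h; right; exact ⟨rfl, by exact_mod_cast h⟩
      · rintro (h | ⟨-, h⟩)
        · have := List.length_drop (l := L) (i := j)
          have hne : L.drop j ≠ [] := List.ne_nil_of_mem h
          have : j < L.length := by
            by_contra hc
            exact hne (List.drop_eq_nil_of_le (by omega))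
          exact_mod_cast Nat.le_of_lt this
        · exact_mod_cast h
    · simp [hx, ih]

-- inner pop: equality of stacks and preservation of the invariants
theorem pop_agree (L : List Char) (stack : List Char) (countsA dup : PySem.Dict Char Int)
    (i : Nat) (rest : List Char) (c : Char)
    (hc : ∀ x, countsA.getD x 0 = (stack.count x : Int) + rest.count x)
    (hd : ∀ x, dup.getD x 0 = (stack.count x : Int))
    (hrest : L.drop i = rest) :
    (lexB_pop (lexB_last L) dup stack (i : Int) c).2 = (lexA_pop countsA stack c).2 ∧
    (∀ x, (lexA_pop countsA stack c).1.getD x 0 =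
      ((lexB_pop (lexB_last L) dup stack (i : Int) c).2.count x : Int) + rest.count x) ∧
    (∀ x, (lexB_pop (lexB_last L) dup stack (i : Int) c).1.getD x 0 =
      ((lexB_pop (lexB_last L) dup stack (i : Int) c).2.count x : Int)) := by
  induction stack generalizing countsA dup with
  | nil => exact ⟨rfl, hc, hd⟩
  | cons top rest' ih =>
    have hcond : (dup.getD top 0 > 1 ∨ (lexB_last L).getD top (-1) ≥ (i : Int)) ↔
        countsA.getD top 0 > 1 := by
      rw [hd, hc, lexB_last_spec L top i, hrest]
      have h1 : (top :: rest').count top ≥ 1 := by simp [List.count_cons_self]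
      have h2 : top ∈ rest ↔ rest.count top ≥ 1 := by
        rw [← List.count_pos_iff]; omega
      rw [h2]
      omega
    simp only [lexA_pop, lexB_pop]
    by_cases hlt : c < top
    · by_cases hgt : countsA.getD top 0 > 1
      · rw [if_pos ⟨hlt, hcond.mpr hgt⟩, if_pos ⟨hlt, hgt⟩]
        apply ih
        · intro x
          by_cases hx : x = top
          · subst hx
            rw [PySem.Dict.getD_modify_self, hc x, List.count_cons_self]
            push_cast; ring
          · rw [PySem.Dict.getD_modify_of_ne _ _ _ hx, hc x,
              List.count_cons_of_ne (fun e => hx e.symm)]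
        · intro x
          by_cases hx : x = top
          · subst hx
            rw [PySem.Dict.getD_modify_self, hd x, List.count_cons_self]
            push_cast; ring
          · rw [PySem.Dict.getD_modify_of_ne _ _ _ hx, hd x,
              List.count_cons_of_ne (fun e => hx e.symm)]
      · rw [if_neg (fun h => hgt (hcond.mp h.2)), if_neg (fun h => hgt h.2)]
        exact ⟨rfl, hc, hd⟩
    · rw [if_neg (fun h => hlt h.1), if_neg (fun h => hlt h.1)]
      exact ⟨rfl, hc, hd⟩

theorem push_agree (L : List Char) (rest : List Char) (i : Nat)
    (countsA dup : PySem.Dict Char Int) (stack : List Char)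
    (hc : ∀ x, countsA.getD x 0 = (stack.count x : Int) + rest.count x)
    (hd : ∀ x, dup.getD x 0 = (stack.count x : Int))
    (hrest : L.drop i = rest) :
    ((PySem.List.enumerate rest (i : Int)).foldl (lexB_push (lexB_last L)) (dup, stack)).2
      = (rest.foldl lexA_push (countsA, stack)).2 := by
  induction rest generalizing i countsA dup stack with
  | nil => rfl
  | cons c rest' ih =>
    rw [PySem.List.enumerate_cons, List.foldl_cons, List.foldl_cons]
    obtain ⟨heq, hc', hd'⟩ := pop_agree L stack countsA dup i (c :: rest') c hc hd hrest
    set pB := lexB_pop (lexB_last L) dup stack (i : Int) c with hpB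
    set pA := lexA_pop countsA stack c with hpA
    have hstepB : lexB_push (lexB_last L) (dup, stack) ((i : Int), c) =
        (pB.1.insert c (pB.1.getD c 0 + 1), c :: pB.2) := by
      simp [lexB_push, ← hpB]
    have hstepA : lexA_push (countsA, stack) c = (pA.1, c :: pA.2) := by
      simp [lexA_push, ← hpA]
    rw [hstepB, hstepA, show ((i : Int) + 1) = ((i + 1 : Nat) : Int) by push_cast; ring]
    rw [← heq]
    apply ih
    · intro x
      rw [hc' x]
      by_cases hx : x = c
      · rw [hx, List.count_cons_self, List.count_cons_self]; push_cast; ring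
      · rw [List.count_cons_of_ne (fun e => hx e.symm),
            List.count_cons_of_ne (fun e => hx e.symm)]
    · intro x
      rw [PySem.Dict.getD_insert]
      by_cases hx : x = c
      · rw [if_pos hx, hx, hd' c, List.count_cons_self]; push_cast; ring
      · rw [if_neg hx, hd' x, List.count_cons_of_ne (fun e => hx e.symm)]
    · rw [← List.drop_drop, hrest]; rfl

theorem lexA_scan_iff (l : List Char) (c : Char) : lexA_scan l c = true ↔ c ∈ l := by
  induction l with
  | nil => simp [lexA_scan]
  | cons x xs ih =>
    simp only [lexA_scan]
    by_cases hx : x = c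
    · subst hx; simp
    · have hb : (x == c) = false := beq_eq_false_iff_ne.mpr hx
      have hc : ¬ c = x := fun e => hx e.symm
      simp [hb, ih, hc]

theorem set_contains_mem (s : PySem.Set Char) (x : Char) :
    PySem.Set.contains s x = true ↔ x ∈ s := by simp

theorem lexB_cut_append (l : List Char) (a : Char) (seen : PySem.Set Char) (i cut : Int) :
    lexB_cut (PySem.List.enumerate (l ++ [a]) i) seen cut =
      if a ∈ seen ∨ a ∈ l then lexB_cut (PySem.List.enumerate l i) seen cut
      else i + l.length + 1 := by
  induction l generalizing seen i cut with
  | nil =>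
    simp only [List.nil_append, PySem.List.enumerate_cons, PySem.List.enumerate_nil, lexB_cut]
    by_cases h : a ∈ seen
    · rw [if_pos ((set_contains_mem _ _).mpr h), if_pos (Or.inl h)]
    · rw [if_neg (fun hc => h ((set_contains_mem _ _).mp hc)),
        if_neg (by simp [h])]
      simp
  | cons x l' ih =>
    rw [List.cons_append, PySem.List.enumerate_cons, PySem.List.enumerate_cons]
    simp only [lexB_cut]
    by_cases hx : PySem.Set.contains seen x
    · rw [if_pos hx, if_pos hx, ih]
      have hmem : (a ∈ seen ∨ a ∈ l') ↔ (a ∈ seen ∨ a ∈ x :: l') := by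
        constructor
        · rintro (h | h)
          · exact Or.inl h
          · exact Or.inr (List.mem_cons_of_mem _ h)
        · rintro (h | h)
          · exact Or.inl h
          · rcases List.mem_cons.mp h with h | h
            · exact Or.inl (h ▸ (set_contains_mem _ _).mp hx)
            · exact Or.inr h
      by_cases hc : a ∈ seen ∨ a ∈ l'
      · rw [if_pos hc, if_pos (hmem.mp hc)]
      · rw [if_neg hc, if_neg (fun h => hc (hmem.mpr h))]
        simp; ring
    · rw [if_neg hx, if_neg hx, ih]
      have hmem : (a ∈ PySem.Set.add seen x ∨ a ∈ l') ↔ (a ∈ seen ∨ a ∈ x :: l') := by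
        rw [PySem.Set.mem_add, List.mem_cons]
        tauto
      by_cases hc : a ∈ PySem.Set.add seen x ∨ a ∈ l'
      · rw [if_pos hc, if_pos (hmem.mp hc)]
      · rw [if_neg hc, if_neg (fun h => hc (hmem.mpr h))]
        simp; ring

theorem lexB_cut_bound (l : List Char) (seen : PySem.Set Char) (i cut : Int) (h : cut ≤ i) :
    cut ≤ lexB_cut (PySem.List.enumerate l i) seen cut ∧
    lexB_cut (PySem.List.enumerate l i) seen cut ≤ i + l.length := by
  induction l generalizing seen i cut with
  | nil => simp [PySem.List.enumerate_nil, lexB_cut]; omega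
  | cons c l' ih =>
    rw [PySem.List.enumerate_cons]
    simp only [lexB_cut, List.length_cons]
    by_cases hc : PySem.Set.contains seen c
    · rw [if_pos hc]
      have := ih seen (i + 1) cut (by omega)
      push_cast at this ⊢; omega
    · rw [if_neg hc]
      have := ih (PySem.Set.add seen c) (i + 1) (i + 1) (by omega)
      push_cast at this ⊢; omega

theorem cut_agree (st : List Char) :
    st.reverse.take (lexB_cut (PySem.List.enumerate st.reverse 0) PySem.Set.empty 0).toNat
      = (lexA_short st).reverse := by
  induction st with
  | nil => simp [PySem.List.enumerate_nil, lexB_cut, lexA_short]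
  | cons top rest ih =>
    have hrev : (top :: rest).reverse = rest.reverse ++ [top] := by simp
    rw [hrev, lexB_cut_append]
    have hse : (top ∈ (PySem.Set.empty : PySem.Set Char) ∨ top ∈ rest.reverse) ↔ top ∈ rest := by
      simp [PySem.Set.empty]
    by_cases hmem : top ∈ rest
    · rw [if_pos (hse.mpr hmem)]
      have hb := (lexB_cut_bound rest.reverse PySem.Set.empty 0 0 le_rfl).2
      have hle : (lexB_cut (PySem.List.enumerate rest.reverse 0) PySem.Set.empty 0).toNat
          ≤ rest.reverse.length := by omega
      rw [List.take_append_of_le_length hle, ih]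
      match rest, hmem with
      | h :: t, hmem =>
        rw [lexA_short, if_pos ((lexA_scan_iff _ _).mpr (List.mem_reverse.mpr hmem))]
    · rw [if_neg (fun h => hmem (hse.mp h))]
      have hlen : ((0 : Int) + rest.reverse.length + 1).toNat = (rest.reverse ++ [top]).length := by
        simp
      rw [hlen, List.take_length]
      match rest with
      | [] => rfl
      | h :: t =>
        rw [lexA_short,
          if_neg (fun hs => hmem (List.mem_reverse.mp ((lexA_scan_iff _ _).mp hs)))]
        simp

-- ===== VERDICT (by name: the statement is the Claim_ definition above) =====
theorem lexSmallestAfterDeletion_spec : Claim_equal_lexSmallestAfterDeletion := by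
  intro s _
  unfold Spec_lexSmallestAfterDeletion lexSmallestAfterDeletion lexSmallestAfterDeletion_alt
  have hstack := push_agree s.toList s.toList 0 (PySem.Dict.counter s.toList)
    PySem.Dict.empty []
    (fun x => by simp [PySem.Dict.getD_counter])
    (fun x => by simp [PySem.Dict.getD_empty])
    (by simp)
  rw [Nat.cast_zero] at hstack
  rw [show (s.toList.foldl lexA_push (PySem.Dict.counter s.toList, [])) =
      ((s.toList.foldl lexA_push (PySem.Dict.counter s.toList, [])).1,
       (s.toList.foldl lexA_push (PySem.Dict.counter s.toList, [])).2) from rfl]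
  rw [show ((PySem.List.enumerate s.toList 0).foldl (lexB_push (lexB_last s.toList))
        (PySem.Dict.empty, [])) =
      (((PySem.List.enumerate s.toList 0).foldl (lexB_push (lexB_last s.toList))
        (PySem.Dict.empty, [])).1,
       ((PySem.List.enumerate s.toList 0).foldl (lexB_push (lexB_last s.toList))
        (PySem.Dict.empty, [])).2) from rfl]
  simp only []
  rw [hstack, cut_agree]
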